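-- pv_equiv track=rewrite | github.com/posl/comment_recommendation | script/split_gen/3_time/zh/192_D/1.py | f
-- ===== SOURCE A (Python) =====
-- def f(x, m):
--     d = int(max(x))
--     if len(x) == 1:
--         return 1 if d <= m else 0
--     ans = 0
--     for i in range(d+1, 11):
--         ans += int(x[0]) * (i ** (len(x)-1))
--     if len(x) == 2:
--         return ans if ans <= m else ans - 1
--     return ans + f(x[1:], m)
-- ===== SOURCE B (Python) =====
-- def f(x, m):
--     digs = [int(c) for c in x]
--     if len(digs) == 1:
--         return 1 if digs[0] <= m else 0
--     run = -1
--     power = -1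
--     total = 0
--     last = 0
--     for d in reversed(digs):
--         if power < 0:
--             run = d
--             power = 0
--             continue
--         if d > run:
--             run = d
--         power += 1
--         s = d * sum(i ** power for i in range(run + 1, 11))
--         if power == 1:
--             last = s
--         total += s
--     return total - 1 if last > m else total
-- ===== Notes on version B (the rewrite author's own statement) =====
-- stated objective: alternative
-- what changed: A's recursion over string suffixes (recomputing max(x[j:]) via max() each level and slicing x[1:]) is replaced by a single right-to-left loop over the digit list that maintains a running max, the running total and the length-2 level's term, applying the <=m adjustment once at the end.
-- outside the precondition, e.g. on f('5 ', 1000): A returns 200, B raises ValueError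
import Mathlib
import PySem

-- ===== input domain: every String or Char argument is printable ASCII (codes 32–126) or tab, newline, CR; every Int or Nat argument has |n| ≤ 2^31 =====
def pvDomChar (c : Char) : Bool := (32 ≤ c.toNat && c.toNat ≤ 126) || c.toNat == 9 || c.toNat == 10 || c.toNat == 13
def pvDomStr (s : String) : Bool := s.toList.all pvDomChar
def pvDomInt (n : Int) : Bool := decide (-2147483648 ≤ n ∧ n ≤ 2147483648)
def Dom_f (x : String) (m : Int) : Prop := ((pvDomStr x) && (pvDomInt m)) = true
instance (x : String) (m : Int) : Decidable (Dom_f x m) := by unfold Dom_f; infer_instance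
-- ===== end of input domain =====

-- B replaces A's recursion over string suffixes by one right-to-left loop with a running max digit (no recursion, no slicing); objective: alternative, same return value.

-- ===== PORT A =====
-- int(c) for a one-character string c; the .getD 0 default is only taken where Python raises ValueError (excluded by Pre_f)
def pyDigit (c : Char) : Int := (PySem.Int.ofStr? (String.ofList [c])).getD 0

-- A's recursion on x, as structural recursion on its character list; x[1:] is the tail of the cons cell; max('') would raise in Python, so the [] arm (0) is unreachable under Pre_f
def fA : List Char → Int → Int
  | [], _ => 0
  | c :: rest, m =>
    let d : Int := pyDigit ((PySem.List.max? (c :: rest) (fun y => y)).getD c)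
    if (c :: rest).length = 1 then (if d ≤ m then 1 else 0)
    else
      let ans : Int := (PySem.List.pyRange (d + 1) 11 1).foldl
        (fun a i => a + pyDigit c * i ^ ((c :: rest).length - 1)) 0
      if (c :: rest).length = 2 then (if ans ≤ m then ans else ans - 1)
      else ans + fA rest m

def f (x : String) (m : Int) : Int := fA x.toList m

-- ===== PORT B =====
-- loop body of Source B's single pass over reversed(digs); state = (run, power, total, last); power ≥ 0 in the else branch, so .toNat is exact for Python's **
def fBstep (st : Int × Int × Int × Int) (d : Int) : Int × Int × Int × Int :=
  match st with
  | (run, power, total, last) =>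
    if power < 0 then (d, 0, total, last)
    else
      let run' := if d > run then d else run
      let power' := power + 1
      let s := d * ((PySem.List.pyRange (run' + 1) 11 1).map (fun i => i ^ power'.toNat)).sum
      (run', power', total + s, if power' = 1 then s else last)

def f_alt (x : String) (m : Int) : Int :=
  let digs := x.toList.map pyDigit
  if digs.length = 1 then (if PySem.List.pyGetD digs 0 0 ≤ m then 1 else 0)
  else
    let st := digs.reverse.foldl fBstep (-1, -1, 0, 0)
    if st.2.2.2 > m then st.2.2.1 - 1 else st.2.2.1

-- ===== PRECONDITION & SPEC =====
-- Pre_f excludes the inputs where A's int()/max() raise ValueError/TypeError: empty x and x containing a non-digit character.  A happens to RETURN on rare non-digit strings whose offending characters all sit past the level where the recursion stops and below the max (e.g. "5 "); those are excluded too (cited in claim.json) because B reads every character and raises there.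
def Pre_f (x : String) (m : Int) : Prop :=
  x.toList ≠ [] ∧ x.toList.all (fun c => 48 ≤ c.toNat && c.toNat ≤ 57) = true
instance (x : String) (m : Int) : Decidable (Pre_f x m) := by unfold Pre_f; infer_instance

def pvWitness_f : String × Int := ("25", 3)

def Spec_f (x : String) (m : Int) (out : Int) : Prop := out = f_alt x m
instance (x : String) (m : Int) (out : Int) : Decidable (Spec_f x m out) := by unfold Spec_f; infer_instance

-- ===== CLAIM (what is proved, stated in full; the proofs are below) =====
def Claim_equal_f : Prop := ∀ (x : String) (m : Int), Dom_f x m → Pre_f x m → Spec_f x m (f x m)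

-- ===== LEMMAS AND PROOFS =====

theorem digit_conv (c : Char) (h1 : 48 ≤ c.toNat) (h2 : c.toNat ≤ 57) :
    PySem.Int.ofChars? [c] = some ((c.toNat : Int) - 48) := by
  have hd : c = '0' ∨ c = '1' ∨ c = '2' ∨ c = '3' ∨ c = '4' ∨ c = '5' ∨ c = '6' ∨ c = '7' ∨ c = '8' ∨ c = '9' := by
    have hv : c.val.toNat = c.toNat := rfl
    have h3 : c.val.toNat = 48 ∨ c.val.toNat = 49 ∨ c.val.toNat = 50 ∨ c.val.toNat = 51 ∨ c.val.toNat = 52 ∨ c.val.toNat = 53 ∨ c.val.toNat = 54 ∨ c.val.toNat = 55 ∨ c.val.toNat = 56 ∨ c.val.toNat = 57 := by omega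
    have key : ∀ n : Nat, n < 4294967296 → c.val.toNat = n → c.val = UInt32.ofNat n := by
      intro n hlt hn
      apply UInt32.toNat.inj
      rw [hn]; exact (UInt32.toNat_ofNat_of_lt' hlt).symm
    rcases h3 with h|h|h|h|h|h|h|h|h|h <;> simp [Char.ext_iff, key _ (by norm_num) h]
  rcases hd with h|h|h|h|h|h|h|h|h|h <;> subst h <;> decide

def digitC (c : Char) : Prop := 48 ≤ c.toNat ∧ c.toNat ≤ 57

theorem pyDigit_eq (c : Char) (h : digitC c) : pyDigit c = (c.toNat : Int) - 48 := by
  unfold pyDigit PySem.Int.ofStr?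
  rw [show (String.ofList [c]).toList = [c] from by simp]
  rw [digit_conv c h.1 h.2]
  rfl

theorem char_max_digit (a b : Char) (ha : digitC a) (hb : digitC b) :
    pyDigit (max a b) = max (pyDigit a) (pyDigit b) := by
  have hle : a ≤ b ↔ a.toNat ≤ b.toNat := by
    constructor <;> intro h
    · exact h
    · exact h
  rw [max_def, max_def]
  split_ifs with h1 h2 h2
  · rfl
  · rw [hle] at h1
    rw [pyDigit_eq a ha, pyDigit_eq b hb] at h2 ⊢
    omega
  · rw [hle] at h1
    rw [pyDigit_eq a ha, pyDigit_eq b hb] at h2 ⊢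
    omega
  · rfl

theorem digitC_max (a b : Char) (ha : digitC a) (hb : digitC b) : digitC (max a b) := by
  rcases max_choice a b with h | h <;> rw [h] <;> assumption

theorem pyDigit_foldl_max : ∀ (t : List Char) (c : Char), (∀ a ∈ c :: t, digitC a) →
    pyDigit (t.foldl max c) = (t.map pyDigit).foldl max (pyDigit c) := by
  intro t
  induction t with
  | nil => intro c _; rfl
  | cons a t ih =>
    intro c h
    have hc : digitC c := h c (by simp)
    have ha : digitC a := h a (by simp)
    simp only [List.foldl_cons, List.map_cons]
    rw [ih (max c a) (by
      intro b hb
      rcases List.mem_cons.mp hb with hb | hb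
      · subst hb; exact digitC_max c a hc ha
      · exact h b (List.mem_cons_of_mem _ (List.mem_cons_of_mem _ hb)))]
    rw [char_max_digit c a hc ha]

-- s_j = d * Σ_{i=run+1}^{10} i^p
def sTerm (d run : Int) (p : Nat) : Int :=
  d * ((PySem.List.pyRange (run + 1) 11 1).map (fun i => i ^ p)).sum

-- (run, total, last) of Source B's loop after consuming a (nonempty) digit list
def bview : List Int → Int × Int × Int
  | [] => (-1, 0, 0)
  | [d] => (d, 0, 0)
  | d :: e :: t =>
    let v := bview (e :: t)
    let r := max v.1 d
    let s := sTerm d r (e :: t).length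
    (r, v.2.1 + s, if (e :: t).length = 1 then s else v.2.2)

theorem foldl_max_comm : ∀ (t : List Int) (e d : Int),
    max (t.foldl max e) d = t.foldl max (max d e) := by
  intro t
  induction t with
  | nil => intro e d; exact max_comm e d
  | cons a t ih =>
    intro e d
    simp only [List.foldl_cons]
    rw [ih (max e a) d, max_assoc]

theorem bview_fst : ∀ (t : List Int) (d : Int), (bview (d :: t)).1 = t.foldl max d := by
  intro t
  induction t with
  | nil => intro d; rfl
  | cons e t ih =>
    intro d
    show max (bview (e :: t)).1 d = _
    rw [ih e, List.foldl_cons, foldl_max_comm]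

theorem Bfold : ∀ (t : List Int) (d : Int),
    (d :: t).foldr (fun a st => fBstep st a) (-1, -1, 0, 0)
      = ((bview (d :: t)).1, (t.length : Int), (bview (d :: t)).2.1, (bview (d :: t)).2.2) := by
  intro t
  induction t with
  | nil => intro d; simp [fBstep, bview]
  | cons e t ih =>
    intro d
    rw [List.foldr_cons, ih e]
    show fBstep _ d = _
    unfold fBstep
    simp only
    rw [if_neg (by omega)]
    have h1 : ((t.length : Int) + 1).toNat = t.length + 1 := by omega
    have h2 : (if d > (bview (e :: t)).1 then d else (bview (e :: t)).1) = max (bview (e :: t)).1 d := by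
      by_cases h : d > (bview (e :: t)).1
      · rw [if_pos h, max_eq_right (le_of_lt h)]
      · rw [if_neg h, max_eq_left (by omega)]
    show (_, _, _, _) = _
    rw [h1, h2]
    have hb : bview (d :: e :: t)
        = (max (bview (e :: t)).1 d,
           (bview (e :: t)).2.1 + sTerm d (max (bview (e :: t)).1 d) (e :: t).length,
           if (e :: t).length = 1 then sTerm d (max (bview (e :: t)).1 d) (e :: t).length else (bview (e :: t)).2.2) := rfl
    rw [hb]
    simp only [List.length_cons, sTerm]
    norm_cast

theorem sum_foldl : ∀ (l : List Int) (k : Int) (p : Nat) (acc : Int),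
    l.foldl (fun a i => a + k * i ^ p) acc = acc + k * (l.map (fun i => i ^ p)).sum := by
  intro l k p
  induction l with
  | nil => intro acc; simp
  | cons i l ih =>
    intro acc
    simp only [List.foldl_cons, List.map_cons, List.sum_cons]
    rw [ih]
    ring

theorem fA_head_digit : ∀ (t : List Char) (c : Char), (∀ a ∈ c :: t, digitC a) →
    pyDigit ((PySem.List.max? (c :: t) (fun y => y)).getD c) = (t.map pyDigit).foldl max (pyDigit c) := by
  intro t c h
  rw [PySem.List.max?_id_cons]
  simp only [Option.getD_some]
  exact pyDigit_foldl_max t c h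

theorem main_lemma : ∀ (t : List Char) (c e : Char) (m : Int), (∀ a ∈ c :: e :: t, digitC a) →
    fA (c :: e :: t) m =
      (if (bview ((c :: e :: t).map pyDigit)).2.2 > m
        then (bview ((c :: e :: t).map pyDigit)).2.1 - 1
        else (bview ((c :: e :: t).map pyDigit)).2.1) := by
  intro t
  induction t with
  | nil =>
    intro c e m h
    rw [fA.eq_2]
    simp only [List.length_cons, List.length_nil, fA_head_digit [e] c h, sum_foldl]
    have hb : bview ([c, e].map pyDigit)
        = (max (pyDigit e) (pyDigit c),
           0 + sTerm (pyDigit c) (max (pyDigit e) (pyDigit c)) 1,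
           sTerm (pyDigit c) (max (pyDigit e) (pyDigit c)) 1) := rfl
    rw [hb]
    simp only [List.map_cons, List.map_nil, List.foldl_cons, List.foldl_nil, sTerm,
      max_comm (pyDigit c) (pyDigit e)]
    norm_num
    split_ifs <;> omega
  | cons a t ih =>
    intro c e m hh
    have hall : ∀ b ∈ e :: a :: t, digitC b := fun b hb => hh b (List.mem_cons_of_mem _ hb)
    rw [fA.eq_2]
    simp only [List.length_cons]
    rw [if_neg (by omega), if_neg (by omega)]
    rw [ih e a m hall]
    rw [fA_head_digit (e :: a :: t) c hh, sum_foldl]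
    have hb : bview ((c :: e :: a :: t).map pyDigit)
        = (max (bview ((e :: a :: t).map pyDigit)).1 (pyDigit c),
           (bview ((e :: a :: t).map pyDigit)).2.1
             + sTerm (pyDigit c) (max (bview ((e :: a :: t).map pyDigit)).1 (pyDigit c)) ((e :: a :: t).map pyDigit).length,
           if ((e :: a :: t).map pyDigit).length = 1
             then sTerm (pyDigit c) (max (bview ((e :: a :: t).map pyDigit)).1 (pyDigit c)) ((e :: a :: t).map pyDigit).length
             else (bview ((e :: a :: t).map pyDigit)).2.2) := rfl
    rw [hb]
    have hlen : ((e :: a :: t).map pyDigit).length = t.length + 2 := by simp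
    rw [hlen]
    rw [if_neg (show ¬ t.length + 2 = 1 from by omega)]
    dsimp only
    rw [show List.map pyDigit (e :: a :: t) = pyDigit e :: List.map pyDigit (a :: t) from rfl]
    rw [bview_fst (List.map pyDigit (a :: t)) (pyDigit e)]
    rw [List.foldl_cons, ← foldl_max_comm]
    rw [show t.length + 1 + 1 + 1 - 1 = t.length + 2 from by omega]
    simp only [sTerm]
    split_ifs <;> ring

-- ===== VERDICT (by name: the statement is the Claim_ definition above) =====
theorem f_spec : Claim_equal_f := by
  intro x m _ hPre
  unfold Spec_f f f_alt
  obtain ⟨hne, hdig0⟩ := hPre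
  have hdig : ∀ c ∈ x.toList, 48 ≤ c.toNat ∧ c.toNat ≤ 57 := by
    intro c hc
    simpa using List.all_eq_true.mp hdig0 c hc
  cases hx : x.toList with
  | nil => exact absurd hx hne
  | cons c rest =>
    rw [hx] at hdig
    cases rest with
    | nil =>
      rw [fA.eq_2]
      simp only [List.length_cons, List.length_nil, List.map_cons, List.map_nil, if_true]
      rw [fA_head_digit [] c hdig]
      simp [PySem.List.pyGetD, PySem.List.pyGet?, PySem.List.pyIdx?]
    | cons e t =>
      rw [main_lemma t c e m hdig]
      rw [if_neg (show ¬ (List.map pyDigit (c :: e :: t)).length = 1 from by simp)]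
      rw [List.foldl_reverse]
      rw [show List.map pyDigit (c :: e :: t) = pyDigit c :: List.map pyDigit (e :: t) from rfl]
      rw [Bfold (List.map pyDigit (e :: t)) (pyDigit c)]
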